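-- pv_equiv track=rewrite | github.com/darkerorr/MacTOSH | crakito.py | make_boxed_menu
-- ===== SOURCE A (Python) =====
-- def make_boxed_menu(options, cols=3, width=78):
--     """
--     options: list of "label" strings already numbered like "[1] ..."
--     Affichage en N colonnes avec bordure ASCII.
--     """
--     # calcul largeur par colonne
--     inner_width = width - 2
--     col_width = inner_width // cols
--     # regroupe par lignes
--     lines = []
--     for i in range(0, len(options), cols):
--         chunk = options[i:i+cols]
--         padded = []
--         for item in chunk:
--             # tronque et pad
--             txt = item[:col_width-1].ljust(col_width)
--             padded.append(txt)
--         while len(padded) < cols: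
--             padded.append("".ljust(col_width))
--         lines.append(padded)
--
--     top = "╔" + "═"*inner_width + "╗"
--     bot = "╚" + "═"*inner_width + "╝"
--     body = []
--     for row in lines:
--         body.append("║" + "".join(row) + "║")
--     return "\n".join([top] + body + [bot])
-- ===== SOURCE B (Python) =====
-- def make_boxed_menu(options, cols=3, width=78):
--     """Single streaming pass: accumulate cells into the current row and flush it
--     every `cols` options; no chunking/slicing of the option list."""
--     inner_width = width - 2
--     col_width = inner_width // cols
--     body, cur, n = [], "", 0
--     for item in options:
--         cur += item[:col_width - 1].ljust(col_width)
--         n += 1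
--         if n == cols:
--             body.append("\u2551" + cur + "\u2551")
--             cur, n = "", 0
--     if n:
--         body.append("\u2551" + cur + " " * ((cols - n) * col_width) + "\u2551")
--     bar = "\u2550" * inner_width
--     return "\n".join(["\u2554" + bar + "\u2557"] + body + ["\u255a" + bar + "\u255d"])
-- ===== Notes on version B (the rewrite author's own statement) =====
-- stated objective: alternative
-- what changed: B makes a single streaming pass over the options with a (current-row, count) accumulator, flushing a bordered row every cols items and space-padding only the final partial row by arithmetic, instead of A's index-range chunking with per-chunk cell lists and a per-row while-loop of filler cells.
-- outside the precondition, e.g. on make_boxed_menu(['', 'a'], -1, -1): A returns '╔╗\n╚╝', B returns '╔╗\n║   a  ║\n╚╝'; on make_boxed_menu(['a'], 0, 10): A raises ZeroDivisionError, B raises ZeroDivisionError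
import Mathlib
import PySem

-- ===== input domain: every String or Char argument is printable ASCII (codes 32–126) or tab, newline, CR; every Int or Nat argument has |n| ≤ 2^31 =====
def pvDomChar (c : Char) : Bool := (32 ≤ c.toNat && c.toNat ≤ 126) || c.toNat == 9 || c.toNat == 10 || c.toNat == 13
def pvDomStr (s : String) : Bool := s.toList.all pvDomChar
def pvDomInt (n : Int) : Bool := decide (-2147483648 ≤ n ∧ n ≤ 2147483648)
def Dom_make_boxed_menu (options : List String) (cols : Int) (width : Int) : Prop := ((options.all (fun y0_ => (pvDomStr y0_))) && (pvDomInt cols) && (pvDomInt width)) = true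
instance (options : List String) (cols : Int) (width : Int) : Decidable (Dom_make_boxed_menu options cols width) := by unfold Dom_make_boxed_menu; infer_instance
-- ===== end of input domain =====

-- B builds the same box in a single streaming pass over the options (a (current-row, count)
-- accumulator flushed every `cols` items, the final partial row space-padded arithmetically)
-- instead of A's index-range chunking with per-chunk cell lists and a filler while-loop;
-- same cost, a different decomposition. Return-value equivalence only; no argument is mutated.

-- ===== PORT A =====
-- item[:col_width-1].ljust(col_width)  (exact: ljust pads with spaces only when shorter)
def pvLjust (cs : List Char) (w : Int) : List Char := cs ++ List.replicate (w.toNat - cs.length) ' '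

def pvCell (cw : Int) (s : String) : List Char :=
  pvLjust (PySem.List.slice s.toList none (some (cw - 1))) cw

-- the `while len(padded) < cols: padded.append("".ljust(col_width))` loop of A
-- (structural recursion on the loop's iteration count, which the guard determines up front)
def pvPadToAux (cw : Int) (fuel : Nat) (padded : List (List Char)) : List (List Char) :=
  match fuel with
  | 0 => padded
  | n + 1 => pvPadToAux cw n (padded ++ [pvLjust [] cw])

def pvPadTo (cols cw : Int) (padded : List (List Char)) : List (List Char) :=
  pvPadToAux cw (cols - (padded.length : Int)).toNat padded

def make_boxed_menu (options : List String) (cols : Int) (width : Int) : String :=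
  let innerW := width - 2
  let colW := PySem.Int.floordiv innerW cols
  let lines := (PySem.List.pyRange 0 (options.length : Int) cols).foldl
    (fun lines i =>
      let chunk := PySem.List.slice options (some i) (some (i + cols))
      let padded := chunk.foldl (fun p item => p ++ [pvCell colW item]) []
      lines ++ [pvPadTo cols colW padded]) []
  let top := '╔' :: (PySem.List.pyRepeat ['═'] innerW ++ ['╗'])
  let bot := '╚' :: (PySem.List.pyRepeat ['═'] innerW ++ ['╝'])
  let body := lines.foldl (fun b row => b ++ ['║' :: (PySem.Chars.join [] row ++ ['║'])]) []
  String.ofList (PySem.Chars.join ['\n'] ([top] ++ body ++ [bot]))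

-- ===== PORT B =====
-- one iteration of B's streaming loop: append the cell to the current row, flush at `cols`
def pvStep (cols cw : Int) (s : List (List Char) × List Char × Int) (item : String) :
    List (List Char) × List Char × Int :=
  let cur := s.2.1 ++ pvCell cw item
  let n := s.2.2 + 1
  if n = cols then (s.1 ++ ['║' :: (cur ++ ['║'])], [], 0) else (s.1, cur, n)

def make_boxed_menu_alt (options : List String) (cols : Int) (width : Int) : String :=
  let innerW := width - 2
  let colW := PySem.Int.floordiv innerW cols
  let s := options.foldl (pvStep cols colW) ([], [], 0)
  let body := if s.2.2 ≠ 0 then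
      s.1 ++ ['║' :: (s.2.1 ++ PySem.List.pyRepeat [' '] ((cols - s.2.2) * colW) ++ ['║'])]
    else s.1
  let bar := PySem.List.pyRepeat ['═'] innerW
  String.ofList (PySem.Chars.join ['\n'] (('╔' :: (bar ++ ['╗'])) :: body ++ ['╚' :: (bar ++ ['╝'])]))

-- ===== PRECONDITION & SPEC =====
-- Pre_ restricts to the natural domain cols ≥ 1: at cols = 0 A (and B) raise ZeroDivisionError
-- at `inner_width // cols`, and a negative column count is malformed input (A's empty body
-- there is an accident of range's negative step, which B's streaming loop has no reason to mirror).
def Pre_make_boxed_menu (options : List String) (cols : Int) (width : Int) : Prop := 1 ≤ cols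
instance (options : List String) (cols : Int) (width : Int) : Decidable (Pre_make_boxed_menu options cols width) := by unfold Pre_make_boxed_menu; infer_instance

def pvWitness_make_boxed_menu : List String × Int × Int :=
  (["[1] Go"], 1, 10)

def Spec_make_boxed_menu (options : List String) (cols : Int) (width : Int) (out : String) : Prop := out = make_boxed_menu_alt options cols width
instance (options : List String) (cols : Int) (width : Int) (out : String) : Decidable (Spec_make_boxed_menu options cols width out) := by unfold Spec_make_boxed_menu; infer_instance

-- ===== CLAIM (what is proved, stated in full; the proofs are below) =====
def Claim_equal_make_boxed_menu : Prop := ∀ (options : List String) (cols : Int) (width : Int), Dom_make_boxed_menu options cols width → Pre_make_boxed_menu options cols width → Spec_make_boxed_menu options cols width (make_boxed_menu options cols width)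

-- ===== LEMMAS AND PROOFS =====

-- proof-side chunking: the groups of `c` consecutive elements (c ≥ 1; last group may be short)
def chunksC {α : Type} (c : Nat) (L : List α) : List (List α) :=
  if h : L = [] then []
  else L.take (max c 1) :: chunksC c (L.drop (max c 1))
termination_by L.length
decreasing_by
  simp [List.length_drop]
  have := List.length_pos_of_ne_nil h
  omega

theorem chunksC_nil {α : Type} (c : Nat) : chunksC c ([] : List α) = [] := by
  rw [chunksC]
  simp

theorem chunksC_eq_of_ne {α : Type} (c : Nat) (hc : 0 < c) (L : List α) (h : L ≠ []) :
    chunksC c L = L.take c :: chunksC c (L.drop c) := by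
  rw [chunksC, dif_neg h, show max c 1 = c from by omega]

theorem pyRange_pos_nil (cols n : Int) (hc : 0 < cols) (hn : n ≤ 0) :
    PySem.List.pyRange 0 n cols = [] := by
  rw [PySem.List.pyRange_of_pos _ _ hc]
  simp [show ¬((0:Int) < n) by omega]

theorem pyRange_pos_cons (cols n : Int) (hc : 0 < cols) (hn : 0 < n) :
    PySem.List.pyRange 0 n cols
      = 0 :: (PySem.List.pyRange 0 (n - cols) cols).map (· + cols) := by
  rw [PySem.List.pyRange_of_pos _ _ hc, PySem.List.pyRange_of_pos _ _ hc]
  have key : (if (0:Int) < n then ((n - 0 + cols - 1) / cols).toNat else 0)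
      = (if (0:Int) < n - cols then ((n - cols - 0 + cols - 1) / cols).toNat else 0) + 1 := by
    rw [if_pos hn]
    by_cases h : (0:Int) < n - cols
    · rw [if_pos h]
      have h1 : n - 0 + cols - 1 = (n - cols - 0 + cols - 1) + 1 * cols := by ring
      rw [h1, Int.add_mul_ediv_right _ _ (show cols ≠ 0 by omega)]
      have hnn : 0 ≤ (n - cols - 0 + cols - 1) / cols :=
        Int.ediv_nonneg (by omega) (by omega)
      omega
    · rw [if_neg h]
      have h1 : (1:Int) ≤ (n - 0 + cols - 1) / cols := by
        rw [Int.le_ediv_iff_mul_le hc]; omega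
      have h2 : (n - 0 + cols - 1) / cols < 2 := by
        rw [Int.ediv_lt_iff_lt_mul hc]; omega
      omega
  rw [key, List.range_succ_eq_map]
  simp only [List.map_cons, List.map_map]
  congr 1
  · norm_num
  · apply List.map_congr_left
    intro k _
    simp [Function.comp, Nat.succ_eq_add_one]
    push_cast
    ring

theorem slice_shift {α : Type} (xs : List α) (c i : Int) (hc : 0 ≤ c) (hi : 0 ≤ i) :
    PySem.List.slice xs (some (i + c)) (some (i + c + c))
      = PySem.List.slice (xs.drop c.toNat) (some i) (some (i + c)) := by
  rw [PySem.List.slice_toNat xs (by omega) (by omega),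
      PySem.List.slice_toNat _ hi (by omega)]
  rw [List.drop_drop]
  have h1 : c.toNat + i.toNat = (i + c).toNat := by omega
  have h2 : (i + c + c).toNat - (i + c).toNat = (i + c).toNat - i.toNat := by omega
  rw [h1, h2]

theorem foldl_snoc_map {α β : Type} (f : α → β) (l : List α) (acc : List β) :
    l.foldl (fun a x => a ++ [f x]) acc = acc ++ l.map f := by
  induction l generalizing acc with
  | nil => simp
  | cons x t ih => simp [ih]

-- A's outer loop: fold over range(0, len, cols) with slicing = map over the chunks
theorem foldChunks {α β : Type} (cols : Int) (hc : 0 < cols) (g : List α → β) :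
    ∀ (N : Nat) (xs : List α), xs.length ≤ N → ∀ (acc : List β),
    (PySem.List.pyRange 0 (xs.length : Int) cols).foldl
        (fun L i => L ++ [g (PySem.List.slice xs (some i) (some (i + cols)))]) acc
      = acc ++ (chunksC cols.toNat xs).map g := by
  intro N
  induction N with
  | zero =>
    intro xs hlen acc
    have : xs = [] := List.eq_nil_of_length_eq_zero (by omega)
    subst this
    simp only [List.length_nil, Nat.cast_zero]
    rw [pyRange_pos_nil cols 0 hc le_rfl]
    simp [chunksC_nil]
  | succ N ih =>
    intro xs hlen acc
    cases xs with
    | nil =>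
      simp only [List.length_nil, Nat.cast_zero]
      rw [pyRange_pos_nil cols 0 hc le_rfl]
      simp [chunksC_nil]
    | cons x t =>
      set xs := x :: t with hxs
      have hn : (0:Int) < (xs.length : Int) := by simp [hxs]
      rw [pyRange_pos_cons cols _ hc hn]
      simp only [List.foldl_cons, List.foldl_map]
      have hslice0 : PySem.List.slice xs (some 0) (some (0 + cols)) = xs.take cols.toNat := by
        rw [PySem.List.slice_zero_start, zero_add, PySem.List.slice_to xs (le_of_lt hc)]
      rw [hslice0]
      rw [PySem.List.foldl_congr_mem _ _
        (fun L i => L ++ [g (PySem.List.slice (xs.drop cols.toNat) (some i) (some (i + cols)))]) _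
        (by
          intro acc' i hi
          rw [PySem.List.mem_pyRange_iff_of_pos hc] at hi
          rw [slice_shift xs cols i (le_of_lt hc) hi.1])]
      rw [chunksC_eq_of_ne cols.toNat (by omega) xs (by simp [hxs])]
      by_cases hcn : cols ≤ (xs.length : Int)
      · have hdl : ((xs.drop cols.toNat).length : Int) = (xs.length : Int) - cols := by
          simp [List.length_drop]; omega
        rw [← hdl]
        rw [ih (xs.drop cols.toNat) (by simp [List.length_drop]; simp [hxs] at hlen ⊢; omega)]
        simp
      · rw [pyRange_pos_nil cols _ hc (by omega)]
        have hde : xs.drop cols.toNat = [] := List.drop_eq_nil_of_le (by omega)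
        rw [hde]
        simp [chunksC_nil]

theorem pvPadToAux_eq (cw : Int) :
    ∀ (n : Nat) (r : List (List Char)),
    pvPadToAux cw n r = r ++ List.replicate n (pvLjust [] cw) := by
  intro n
  induction n with
  | zero => intro r; simp [pvPadToAux]
  | succ n ih => intro r; simp [pvPadToAux, ih, List.replicate_succ]

theorem pvPadTo_eq (cols cw : Int) (r : List (List Char)) :
    pvPadTo cols cw r = r ++ List.replicate (cols.toNat - r.length) (pvLjust [] cw) := by
  unfold pvPadTo
  rw [pvPadToAux_eq]
  have h : (cols - (r.length : Int)).toNat = cols.toNat - r.length := by omega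
  rw [h]

-- ''.join with empty separator is flatten
theorem join_empty_flatten : ∀ l : List (List Char), PySem.Chars.join [] l = l.flatten := by
  intro l
  induction l with
  | nil => simp [PySem.Chars.join, List.intercalate]
  | cons x t ih =>
    cases t with
    | nil => simp [PySem.Chars.join, List.intercalate, List.intersperse]
    | cons y u =>
      rw [PySem.Chars.join_cons_cons, ih]
      simp

theorem flatten_replicate_replicate (m k : Nat) (c : Char) :
    (List.replicate m (List.replicate k c)).flatten = List.replicate (m * k) c := by
  induction m with
  | zero => simp
  | succ m ih =>
    rw [List.replicate_succ, List.flatten_cons, ih, List.replicate_append_replicate]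
    congr 1
    ring

-- B's loop never flushes while fewer than `cols` items have been seen since the last flush
theorem pvStep_partial (cols cw : Int) :
    ∀ (xs : List String) (b : List (List Char)) (cur : List Char) (n : Int),
    0 ≤ n → n + (xs.length : Int) < cols →
    xs.foldl (pvStep cols cw) (b, cur, n)
      = (b, cur ++ xs.flatMap (pvCell cw), n + (xs.length : Int)) := by
  intro xs
  induction xs with
  | nil => intro b cur n _ _; simp
  | cons x t ih =>
    intro b cur n hn hlt
    simp only [List.foldl_cons]
    have hne : ¬ (n + 1 = cols) := by
      have : (0:Int) ≤ (t.length : Int) := by positivity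
      simp at hlt
      omega
    rw [show pvStep cols cw (b, cur, n) x = (b, cur ++ pvCell cw x, n + 1) from by
      simp [pvStep, hne]]
    rw [ih b (cur ++ pvCell cw x) (n + 1) (by omega) (by simp at hlt ⊢; omega)]
    simp
    omega

-- a full group of `cols` items flushes exactly one bordered row and resets the accumulator
theorem pvStep_full (cols cw : Int) (hc : 1 ≤ cols) (xs : List String)
    (hlen : (xs.length : Int) = cols) (b : List (List Char)) :
    xs.foldl (pvStep cols cw) (b, [], 0)
      = (b ++ ['║' :: (xs.flatMap (pvCell cw) ++ ['║'])], [], 0) := by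
  have hne : xs ≠ [] := by
    intro h; rw [h] at hlen; simp at hlen; omega
  have hx : xs = xs.dropLast ++ [xs.getLast hne] := (List.dropLast_append_getLast hne).symm
  have hpos : 0 < xs.length := List.length_pos_of_ne_nil hne
  have hdl : xs.dropLast.length = xs.length - 1 := List.length_dropLast
  rw [hx, List.foldl_append]
  rw [pvStep_partial cols cw xs.dropLast b [] 0 le_rfl (by rw [hdl]; omega)]
  have hfin : (0:Int) + (xs.dropLast.length : Int) + 1 = cols := by
    rw [hdl]
    omega
  simp only [List.foldl_cons, List.foldl_nil]
  rw [show pvStep cols cw (b, [] ++ xs.dropLast.flatMap (pvCell cw), (0:Int) + (xs.dropLast.length : Int)) (xs.getLast hne)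
      = (b ++ ['║' :: ((xs.dropLast.flatMap (pvCell cw) ++ pvCell cw (xs.getLast hne)) ++ ['║'])], [], 0) from by
    simp [pvStep]
    omega]
  simp

-- the padding of B's last partial row is A's run of filler cells, flattened
theorem pad_arith (cols cw : Int) (len : Nat) (hlt : (len : Int) < cols) :
    List.replicate ((cols - (len : Int)) * cw).toNat ' '
      = (List.replicate (cols.toNat - len) (pvLjust [] cw)).flatten := by
  have hpv : pvLjust [] cw = List.replicate cw.toNat ' ' := by simp [pvLjust]
  rw [hpv, flatten_replicate_replicate]
  congr 1
  by_cases hcw : 0 ≤ cw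
  · have h2 : ((cols.toNat - len : Nat) : Int) = cols - (len : Int) := by omega
    have h3 : ((cw.toNat : Nat) : Int) = cw := by omega
    rw [← h2, ← h3, ← Nat.cast_mul, Int.toNat_natCast, Int.toNat_natCast]
  · have h1 : ((cols - (len : Int)) * cw) ≤ 0 :=
      mul_nonpos_of_nonneg_of_nonpos (by omega) (by omega)
    have h2 : cw.toNat = 0 := by omega
    rw [Int.toNat_of_nonpos h1, h2, Nat.mul_zero]

-- B's whole loop (with the final flush) produces exactly A's row list, chunk for chunk
theorem bodyFold (cols cw : Int) (hc : 1 ≤ cols) :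
    ∀ (N : Nat) (xs : List String), xs.length ≤ N → ∀ (b : List (List Char)),
    (if (xs.foldl (pvStep cols cw) (b, [], 0)).2.2 ≠ 0
     then (xs.foldl (pvStep cols cw) (b, [], 0)).1 ++
       ['║' :: ((xs.foldl (pvStep cols cw) (b, [], 0)).2.1 ++
         List.replicate ((cols - (xs.foldl (pvStep cols cw) (b, [], 0)).2.2) * cw).toNat ' ' ++ ['║'])]
     else (xs.foldl (pvStep cols cw) (b, [], 0)).1)
    = b ++ (chunksC cols.toNat xs).map
        (fun ch => '║' :: (PySem.Chars.join [] (pvPadTo cols cw (ch.map (pvCell cw))) ++ ['║'])) := by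
  intro N
  induction N with
  | zero =>
    intro xs hlen b
    have : xs = [] := List.eq_nil_of_length_eq_zero (by omega)
    subst this
    simp [chunksC_nil]
  | succ N ih =>
    intro xs hlen b
    cases xs with
    | nil => simp [chunksC_nil]
    | cons x t =>
      set xs := x :: t with hxs
      by_cases hcn : cols ≤ (xs.length : Int)
      · -- a full first chunk: flush it, recurse on the rest
        have htl : ((xs.take cols.toNat).length : Int) = cols := by
          simp [List.length_take]
          omega
        rw [show xs.foldl (pvStep cols cw) (b, [], 0)
            = (xs.drop cols.toNat).foldl (pvStep cols cw)
                ((xs.take cols.toNat).foldl (pvStep cols cw) (b, [], 0)) from by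
          rw [← List.foldl_append, List.take_append_drop]]
        rw [pvStep_full cols cw hc _ htl b]
        rw [ih (xs.drop cols.toNat) (by simp [List.length_drop]; simp [hxs] at hlen ⊢; omega)]
        rw [chunksC_eq_of_ne cols.toNat (by omega) xs (by simp [hxs])]
        simp only [List.map_cons, List.cons_append, List.append_assoc]
        congr 2
        · -- the flushed row is A's padded row for the (full) chunk
          rw [pvPadTo_eq]
          have hz : cols.toNat - ((xs.take cols.toNat).map (pvCell cw)).length = 0 := by
            simp [List.length_take, List.length_map]
            omega
          rw [hz]
          simp [join_empty_flatten, List.flatMap_def]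
      · -- a short (last) chunk: no flush, the final if pads it
        have hlt : (0:Int) + (xs.length : Int) < cols := by omega
        rw [pvStep_partial cols cw xs b [] 0 le_rfl hlt]
        rw [if_pos (by rw [hxs]; simp only [List.length_cons]; push_cast; omega)]
        rw [chunksC_eq_of_ne cols.toNat (by omega) xs (by simp [hxs])]
        rw [List.take_of_length_le (by omega), List.drop_eq_nil_of_le (by omega), chunksC_nil]
        simp only [List.map_cons, List.map_nil, List.nil_append]
        congr 2
        rw [pvPadTo_eq, join_empty_flatten, List.flatten_append]
        simp only [List.length_map, zero_add, List.flatMap_def]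
        rw [pad_arith cols cw xs.length (by omega)]

-- ===== VERDICT (by name: the statement is the Claim_ definition above) =====
theorem make_boxed_menu_spec : Claim_equal_make_boxed_menu := by
  intro options cols width _ hpre
  unfold Pre_make_boxed_menu at hpre
  unfold Spec_make_boxed_menu make_boxed_menu make_boxed_menu_alt
  simp only [PySem.List.pyRepeat_singleton]
  set colW := PySem.Int.floordiv (width - 2) cols with hcolW
  -- A's inner cell loop is a map
  have hinner : ∀ (chunk : List String),
      chunk.foldl (fun p item => p ++ [pvCell colW item]) [] = chunk.map (pvCell colW) := by
    intro chunk
    rw [foldl_snoc_map]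
    simp
  rw [PySem.List.foldl_congr_mem _ _
      (fun (lines : List (List (List Char))) i =>
        lines ++ [pvPadTo cols colW
          ((PySem.List.slice options (some i) (some (i + cols))).map (pvCell colW))]) _
      (by intro acc i _; rw [hinner])]
  -- A's outer fold and row fold become the chunk map
  rw [foldChunks cols (by omega) (fun ch => pvPadTo cols colW (ch.map (pvCell colW)))
    options.length options le_rfl [], List.nil_append, foldl_snoc_map, List.map_map]
  -- B's streaming fold becomes the same chunk map
  rw [bodyFold cols colW (by omega) options.length options le_rfl []]
  simp [Function.comp_def]
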